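-- pv_equiv track=rewrite | github.com/isaacgounton/griot-app | app/services/video/text_overlay.py | _escape_text_for_ffmpeg
-- ===== SOURCE A (Python) =====
-- def _escape_text_for_ffmpeg(text: str) -> str:
--     """Properly escape text for FFmpeg drawtext filter."""
--     # Handle the most problematic characters for FFmpeg
--     escape_map = {
--         ':': r'\:',
--         "'": r"\'",
--         '"': r'\"',
--         '\\': r'\\\\',
--         '[': r'\[',
--         ']': r'\]',
--         '%': r'\%',
--         '=': r'\=',
--         ';': r'\;',
--         ',': r'\,'
--     }
--
--     escaped = text
--     for char, replacement in escape_map.items():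
--         escaped = escaped.replace(char, replacement)
--
--     return escaped
-- ===== SOURCE B (Python) =====
-- # Single-pass rewrite: one translation table applied with str.translate,
-- # with the later backslash-doubling pass pre-baked into the table entries.
-- _FF_TABLE = {
--     ord(':'): '\\\\\\\\:',
--     ord("'"): "\\\\\\\\'",
--     ord('"'): '\\\\\\\\"',
--     ord('\\'): '\\\\\\\\',
--     ord('['): '\\[',
--     ord(']'): '\\]',
--     ord('%'): '\\%',
--     ord('='): '\\=',
--     ord(';'): '\\;',
--     ord(','): '\\,',
-- }
--
-- def _escape_text_for_ffmpeg(text: str) -> str: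
--     """Properly escape text for FFmpeg drawtext filter (single pass)."""
--     return text.translate(_FF_TABLE)
-- ===== Notes on version B (the rewrite author's own statement) =====
-- stated objective: idiomatic
-- what changed: Replaces A's ten sequential str.replace passes (whose later backslash pass re-escapes backslashes introduced by earlier passes) with a single str.translate over one precomputed table that has the cascade baked in, so the string is traversed once.
import Mathlib
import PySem

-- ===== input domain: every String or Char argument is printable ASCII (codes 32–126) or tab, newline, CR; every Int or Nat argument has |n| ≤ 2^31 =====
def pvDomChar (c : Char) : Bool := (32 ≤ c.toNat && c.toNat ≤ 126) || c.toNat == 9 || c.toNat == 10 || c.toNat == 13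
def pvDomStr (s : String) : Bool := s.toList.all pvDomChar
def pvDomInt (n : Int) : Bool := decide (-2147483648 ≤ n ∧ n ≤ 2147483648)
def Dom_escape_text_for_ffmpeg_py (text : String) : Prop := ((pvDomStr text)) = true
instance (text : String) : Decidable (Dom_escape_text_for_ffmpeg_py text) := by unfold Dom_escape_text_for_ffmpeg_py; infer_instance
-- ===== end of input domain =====

-- B replaces A's ten sequential str.replace passes (whose backslash pass re-escapes
-- the backslashes earlier passes introduced) by ONE per-character translation table
-- with that cascade pre-baked in, applied in a single pass (idiomatic str.translate).

-- ===== PORT A =====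
-- literal transliteration: a dict literal, then a loop over its items doing str.replace
def pvEscapeMap : PySem.Dict String String := PySem.Dict.ofList
  [(":", "\\:"), ("'", "\\'"), ("\"", "\\\""), ("\\", "\\\\\\\\"),
   ("[", "\\["), ("]", "\\]"), ("%", "\\%"), ("=", "\\="),
   (";", "\\;"), (",", "\\,")]

def escape_text_for_ffmpeg_py (text : String) : String :=
  pvEscapeMap.items.foldl (fun escaped cr => PySem.Str.replace escaped cr.1 cr.2) text

-- ===== PORT B =====
-- the translation table of Source B: each char maps to its fully-cascaded escape
def pvFFTable (c : Char) : List Char :=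
  if c = ':' then ['\\','\\','\\','\\',':']
  else if c = '\'' then ['\\','\\','\\','\\','\'']
  else if c = '"' then ['\\','\\','\\','\\','"']
  else if c = '\\' then ['\\','\\','\\','\\']
  else if c = '[' then ['\\','[']
  else if c = ']' then ['\\',']']
  else if c = '%' then ['\\','%']
  else if c = '=' then ['\\','=']
  else if c = ';' then ['\\',';']
  else if c = ',' then ['\\',',']
  else [c]

-- str.translate: one pass, each code point replaced by its table entry
def escape_text_for_ffmpeg_py_alt (text : String) : String :=
  String.ofList (text.toList.flatMap pvFFTable)

-- ===== PRECONDITION & SPEC =====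
def Spec_escape_text_for_ffmpeg_py (text : String) (out : String) : Prop := out = escape_text_for_ffmpeg_py_alt text
instance (text : String) (out : String) : Decidable (Spec_escape_text_for_ffmpeg_py text out) := by unfold Spec_escape_text_for_ffmpeg_py; infer_instance

-- ===== CLAIM (what is proved, stated in full; the proofs are below) =====
def Claim_equal_escape_text_for_ffmpeg_py : Prop := ∀ (text : String), Dom_escape_text_for_ffmpeg_py text → Spec_escape_text_for_ffmpeg_py text (escape_text_for_ffmpeg_py text)

-- ===== LEMMAS AND PROOFS =====

-- Chars.replace.go with a single-char pattern is a flatMap (fuel ≥ length of the rest)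
theorem pv_go_single (c : Char) (new : List Char) :
    ∀ (fuel : Nat) (l acc : List Char), l.length ≤ fuel →
      PySem.Chars.replace.go [c] new fuel l acc =
        acc.reverse ++ l.flatMap (fun x => if x = c then new else [x]) := by
  intro fuel
  induction fuel with
  | zero =>
    intro l acc h
    have : l = [] := List.length_eq_zero_iff.mp (Nat.le_zero.mp h)
    subst this
    simp [PySem.Chars.replace.go]
  | succ n ih =>
    intro l acc h
    cases l with
    | nil => simp [PySem.Chars.replace.go]
    | cons c0 t =>
      by_cases hc : c0 = c
      · subst hc
        have hp : [c0].isPrefixOf (c0 :: t) = true := by simp [List.isPrefixOf]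
        simp only [PySem.Chars.replace.go, hp, if_true, List.length_cons,
          List.length_nil, List.drop_succ_cons, List.drop_zero]
        rw [ih t (new.reverse ++ acc) (by simpa using Nat.le_of_succ_le_succ h)]
        simp
      · have hp : [c].isPrefixOf (c0 :: t) = false := by
          simp [List.isPrefixOf]; exact fun h' => absurd h'.symm hc
        simp only [PySem.Chars.replace.go, hp, Bool.false_eq_true, if_false]
        rw [ih t (c0 :: acc) (by simpa using Nat.le_of_succ_le_succ h)]
        simp [hc]

theorem pv_replace_single (s : List Char) (c : Char) (new : List Char) :
    PySem.Chars.replace s [c] new = s.flatMap (fun x => if x = c then new else [x]) := by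
  simp only [PySem.Chars.replace, List.isEmpty_cons, Bool.false_eq_true, if_false]
  simpa using pv_go_single c new s.length s [] le_rfl

theorem pv_items : pvEscapeMap.items =
    [(":", "\\:"), ("'", "\\'"), ("\"", "\\\""), ("\\", "\\\\\\\\"),
     ("[", "\\["), ("]", "\\]"), ("%", "\\%"), ("=", "\\="),
     (";", "\\;"), (",", "\\,")] := by decide

-- the ten cascaded single-char substitutions collapse to B's one-pass table
theorem pv_chain (s : List Char) :
    ((((((((((s.flatMap (fun x => if x = ':' then ['\\',':'] else [x])).flatMap
      (fun x => if x = '\'' then ['\\','\''] else [x])).flatMap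
      (fun x => if x = '"' then ['\\','"'] else [x])).flatMap
      (fun x => if x = '\\' then ['\\','\\','\\','\\'] else [x])).flatMap
      (fun x => if x = '[' then ['\\','['] else [x])).flatMap
      (fun x => if x = ']' then ['\\',']'] else [x])).flatMap
      (fun x => if x = '%' then ['\\','%'] else [x])).flatMap
      (fun x => if x = '=' then ['\\','='] else [x])).flatMap
      (fun x => if x = ';' then ['\\',';'] else [x])).flatMap
      (fun x => if x = ',' then ['\\',','] else [x])) = s.flatMap pvFFTable := by
  simp only [List.flatMap_assoc]
  congr 1
  funext c
  by_cases h1 : c = ':';  · subst h1; decide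
  by_cases h2 : c = '\''; · subst h2; decide
  by_cases h3 : c = '"';  · subst h3; decide
  by_cases h4 : c = '\\'; · subst h4; decide
  by_cases h5 : c = '[';  · subst h5; decide
  by_cases h6 : c = ']';  · subst h6; decide
  by_cases h7 : c = '%';  · subst h7; decide
  by_cases h8 : c = '=';  · subst h8; decide
  by_cases h9 : c = ';';  · subst h9; decide
  by_cases h10 : c = ','; · subst h10; decide
  simp [pvFFTable, h1, h2, h3, h4, h5, h6, h7, h8, h9, h10]

-- ===== VERDICT (by name: the statement is the Claim_ definition above) =====
set_option maxHeartbeats 1000000 in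
theorem escape_text_for_ffmpeg_py_spec : Claim_equal_escape_text_for_ffmpeg_py := by
  intro text _
  unfold Spec_escape_text_for_ffmpeg_py escape_text_for_ffmpeg_py escape_text_for_ffmpeg_py_alt
  rw [pv_items]
  simp only [List.foldl, PySem.Str.replace, String.toList_ofList,
    show (":" : String).toList = [':'] from rfl,
    show ("'" : String).toList = ['\''] from rfl,
    show ("\"" : String).toList = ['"'] from rfl,
    show ("\\" : String).toList = ['\\'] from rfl,
    show ("[" : String).toList = ['['] from rfl,
    show ("]" : String).toList = [']'] from rfl,
    show ("%" : String).toList = ['%'] from rfl,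
    show ("=" : String).toList = ['='] from rfl,
    show (";" : String).toList = [';'] from rfl,
    show ("," : String).toList = [','] from rfl,
    show ("\\:" : String).toList = ['\\',':'] from rfl,
    show ("\\'" : String).toList = ['\\','\''] from rfl,
    show ("\\\"" : String).toList = ['\\','"'] from rfl,
    show ("\\\\\\\\" : String).toList = ['\\','\\','\\','\\'] from rfl,
    show ("\\[" : String).toList = ['\\','['] from rfl,
    show ("\\]" : String).toList = ['\\',']'] from rfl,
    show ("\\%" : String).toList = ['\\','%'] from rfl,
    show ("\\=" : String).toList = ['\\','='] from rfl,
    show ("\\;" : String).toList = ['\\',';'] from rfl,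
    show ("\\," : String).toList = ['\\',','] from rfl,
    pv_replace_single]
  rw [pv_chain text.toList]
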